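-- pv_equiv track=rewrite | github.com/ji1360677347/douyin-downloader | tests/test_proxy_validator_parity.py | _expected_is_valid
-- ===== SOURCE A (Python) =====
-- def _expected_is_valid(s: str) -> bool:
--     """Reference oracle mirroring the exact contract of ``_is_valid_proxy``.
--
--     The oracle is derived from :data:`server.app._PROXY_RE` and the docstring
--     on :func:`server.app._is_valid_proxy`:
--
--     - Empty string → valid (means "no proxy").
--     - Otherwise must match ``^(https?|socks5h?)://(.+)$`` (case-sensitive)
--       AND the post-scheme host portion must contain at least one
--       non-whitespace character.
--     """
--     if s == "":
--         return True
--     # Case-sensitive scheme check.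
--     for scheme in ("http", "https", "socks5h", "socks5"):
--         # Order matters: match ``socks5h`` before ``socks5`` so the longer
--         # prefix wins.
--         prefix = scheme + "://"
--         if s.startswith(prefix):
--             host = s[len(prefix) :]
--             return host.strip() != ""
--     return False
-- ===== SOURCE B (Python) =====
-- def _expected_is_valid(s: str) -> bool:
--     if s == "":
--         return True
--     idx = s.find("://")
--     if idx < 0:
--         return False
--     scheme = s[:idx]
--     host = s[idx + 3:]
--     return scheme in {"http", "https", "socks5h", "socks5"} and host.strip() != ""
-- ===== Notes on version B (the rewrite author's own statement) =====
-- stated objective: simpler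
-- what changed: replaces A's ordered four-way prefix-scan loop by a single search for the scheme separator that splits the string into scheme and host, followed by a set-membership test on the scheme
import Mathlib
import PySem

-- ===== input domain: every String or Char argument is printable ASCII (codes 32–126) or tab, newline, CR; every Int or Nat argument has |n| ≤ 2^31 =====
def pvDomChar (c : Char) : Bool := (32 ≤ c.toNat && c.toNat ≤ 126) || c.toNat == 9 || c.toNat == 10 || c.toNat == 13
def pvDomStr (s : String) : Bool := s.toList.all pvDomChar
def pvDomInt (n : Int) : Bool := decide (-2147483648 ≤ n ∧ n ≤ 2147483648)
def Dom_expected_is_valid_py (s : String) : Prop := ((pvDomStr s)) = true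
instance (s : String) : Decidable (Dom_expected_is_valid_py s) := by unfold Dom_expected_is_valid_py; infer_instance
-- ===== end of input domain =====

-- B replaces A's ordered prefix-scan loop by a single find('://') split into scheme/host plus a set-membership test (objective: simpler).

-- the literal "://" used by both Pythons
def pvSep : List Char := "://".toList

-- ===== PORT A =====
-- the 'for scheme in (...)' loop of A, as recursion over the scheme tuple
def pvLoopA : List (List Char) → List Char → Bool
  | [], _ => false
  | scheme :: rest, l =>
      -- prefix = scheme + "://" ; host = s[len(prefix):]
      if PySem.Chars.startswith l (scheme ++ pvSep) then
        !(PySem.Chars.strip (PySem.Chars.slice l (some (((scheme ++ pvSep).length : Nat) : Int)) none) == [])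
      else pvLoopA rest l

def expected_is_valid_py (s : String) : Bool :=
  if s.toList = [] then true
  else pvLoopA ["http".toList, "https".toList, "socks5h".toList, "socks5".toList] s.toList

-- ===== PORT B =====
def pvSchemeSet : PySem.Set (List Char) :=
  PySem.Set.ofList ["http".toList, "https".toList, "socks5h".toList, "socks5".toList]

def expected_is_valid_py_alt (s : String) : Bool :=
  if s.toList = [] then true
  else
    let idx := PySem.Chars.find s.toList pvSep
    if idx < 0 then false
    else
      let scheme := PySem.Chars.slice s.toList none (some idx)
      let host := PySem.Chars.slice s.toList (some (idx + 3)) none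
      PySem.Set.contains pvSchemeSet scheme && !(PySem.Chars.strip host == [])

-- ===== PRECONDITION & SPEC =====
def Spec_expected_is_valid_py (s : String) (out : Bool) : Prop := out = expected_is_valid_py_alt s
instance (s : String) (out : Bool) : Decidable (Spec_expected_is_valid_py s out) := by unfold Spec_expected_is_valid_py; infer_instance

-- ===== CLAIM (what is proved, stated in full; the proofs are below) =====
def Claim_equal_expected_is_valid_py : Prop := ∀ (s : String), Dom_expected_is_valid_py s → Spec_expected_is_valid_py s (expected_is_valid_py s)

-- ===== LEMMAS AND PROOFS =====

-- If s starts with p + "://" and p contains no ':', the FIRST occurrence of "://" is at index p.length.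
lemma pvFindEq (l p : List Char) (hno : (':' : Char) ∉ p) (h : (p ++ pvSep) <+: l) :
    PySem.Chars.find l pvSep = (p.length : Int) := by
  have hinf : pvSep <:+: l := (List.suffix_append p pvSep).isInfix.trans h.isInfix
  have hnn : 0 ≤ PySem.Chars.find l pvSep := (PySem.Chars.find_nonneg_iff l pvSep).mpr hinf
  obtain ⟨spec1, spec2⟩ := PySem.Chars.find_spec hnn
  set k := (PySem.Chars.find l pvSep).toNat with hk
  obtain ⟨t, ht⟩ := h
  have hdropP : l.drop p.length = pvSep ++ t := by
    rw [← ht, List.append_assoc, List.drop_left]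
  have hk_le : k ≤ p.length := by
    by_contra hgt
    exact spec2 p.length (by omega) ⟨t, hdropP.symm⟩
  have hk_ge : p.length ≤ k := by
    by_contra hlt
    simp only [not_le] at hlt
    obtain ⟨u, hu⟩ := spec1
    have hl : l = p ++ (pvSep ++ t) := by rw [← ht, List.append_assoc]
    have hcol : l[k]? = some ':' := by
      have h0 : (l.drop k)[0]? = some ':' := by rw [← hu]; simp [pvSep]
      simpa using h0
    rw [hl, List.getElem?_append_left hlt, List.getElem?_eq_getElem hlt] at hcol
    exact hno ((Option.some_inj.mp hcol) ▸ List.getElem_mem hlt)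
  omega

-- A's per-scheme prefix test, rephrased through B's split at the first "://".
lemma pvStartsEq (l p : List Char) (hno : (':' : Char) ∉ p)
    (hnn : 0 ≤ PySem.Chars.find l pvSep) :
    PySem.Chars.startswith l (p ++ pvSep)
      = decide (l.take (PySem.Chars.find l pvSep).toNat = p) := by
  obtain ⟨spec1, _⟩ := PySem.Chars.find_spec hnn
  by_cases h : l.take (PySem.Chars.find l pvSep).toNat = p
  · simp only [h, decide_true]
    rw [PySem.Chars.startswith_iff]
    obtain ⟨u, hu⟩ := spec1
    exact ⟨u, by rw [← h, List.append_assoc, hu, List.take_append_drop]⟩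
  · simp only [h, decide_false]
    rw [← Bool.not_eq_true, PySem.Chars.startswith_iff]
    intro hpre
    have hf := pvFindEq l p hno hpre
    obtain ⟨t, ht⟩ := hpre
    apply h
    rw [hf, Int.toNat_natCast, ← ht, List.append_assoc, List.take_left]

-- ===== VERDICT (by name: the statement is the Claim_ definition above) =====
theorem expected_is_valid_py_spec : Claim_equal_expected_is_valid_py := by
  unfold Claim_equal_expected_is_valid_py Spec_expected_is_valid_py
  intro s _
  unfold expected_is_valid_py expected_is_valid_py_alt
  by_cases h0 : s.toList = []
  · simp [h0]
  · simp only [h0, if_false]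
    by_cases hneg : PySem.Chars.find s.toList pvSep < 0
    · have hm1 : PySem.Chars.find s.toList pvSep = -1 := by
        have := PySem.Chars.neg_one_le_find s.toList pvSep
        omega
      have hinf : ¬ pvSep <:+: s.toList := (PySem.Chars.find_eq_neg_one_iff _ _).mp hm1
      have hns : ∀ p : List Char, PySem.Chars.startswith s.toList (p ++ pvSep) = false := by
        intro p
        rw [← Bool.not_eq_true, PySem.Chars.startswith_iff]
        intro hpre
        exact hinf ((List.suffix_append p pvSep).isInfix.trans hpre.isInfix)
      have e1 : PySem.Chars.startswith s.toList ('h'::'t'::'t'::'p'::pvSep) = false :=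
        hns ['h','t','t','p']
      have e2 : PySem.Chars.startswith s.toList ('h'::'t'::'t'::'p'::'s'::pvSep) = false :=
        hns ['h','t','t','p','s']
      have e3 : PySem.Chars.startswith s.toList ('s'::'o'::'c'::'k'::'s'::'5'::'h'::pvSep) = false :=
        hns ['s','o','c','k','s','5','h']
      have e4 : PySem.Chars.startswith s.toList ('s'::'o'::'c'::'k'::'s'::'5'::pvSep) = false :=
        hns ['s','o','c','k','s','5']
      simp [pvLoopA, e1, e2, e3, e4, hneg]
    · simp only [not_lt] at hneg
      obtain ⟨k, hk⟩ : ∃ k : Nat, PySem.Chars.find s.toList pvSep = (k : Int) :=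
        ⟨(PySem.Chars.find s.toList pvSep).toNat, (Int.toNat_of_nonneg hneg).symm⟩
      have hkl : k ≤ s.toList.length := by
        have := PySem.Chars.find_le_length s.toList pvSep
        omega
      have hst : ∀ p : List Char, (':' : Char) ∉ p → PySem.Chars.startswith s.toList (p ++ pvSep)
          = decide (s.toList.take k = p) := by
        intro p hp
        have := pvStartsEq s.toList p hp hneg
        rwa [hk, Int.toNat_natCast] at this
      have h1 : PySem.Chars.startswith s.toList ("http".toList ++ pvSep)
          = decide (s.toList.take k = "http".toList) := hst _ (by decide)
      have h2 : PySem.Chars.startswith s.toList ("https".toList ++ pvSep)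
          = decide (s.toList.take k = "https".toList) := hst _ (by decide)
      have h3 : PySem.Chars.startswith s.toList ("socks5h".toList ++ pvSep)
          = decide (s.toList.take k = "socks5h".toList) := hst _ (by decide)
      have h4 : PySem.Chars.startswith s.toList ("socks5".toList ++ pvSep)
          = decide (s.toList.take k = "socks5".toList) := hst _ (by decide)
      have hlen : ∀ p : List Char, s.toList.take k = p → k = p.length := by
        intro p hp
        have h' := congrArg List.length hp
        rw [List.length_take] at h'
        omega
      have hslice : PySem.List.slice s.toList none (some (k : Int)) = s.toList.take k :=
        PySem.List.slice_to_natCast s.toList k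
      have hhost : PySem.List.slice s.toList (some ((k : Int) + 3)) none = s.toList.drop (k + 3) := by
        rw [show ((k : Int) + 3) = ((k + 3 : Nat) : Int) by push_cast; ring,
          PySem.List.slice_from_natCast]
      have hL1 : ("http".toList ++ pvSep).length = 7 := by decide
      have hL2 : ("https".toList ++ pvSep).length = 8 := by decide
      have hL3 : ("socks5h".toList ++ pvSep).length = 10 := by decide
      have hL4 : ("socks5".toList ++ pvSep).length = 9 := by decide
      have hset : pvSchemeSet = ["http".toList, "https".toList, "socks5h".toList, "socks5".toList] := by
        decide
      simp only [pvLoopA, h1, h2, h3, h4, hL1, hL2, hL3, hL4, PySem.Chars.slice_eq_listSlice,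
        hk, hslice, hhost, PySem.List.slice_from_natCast]
      by_cases e1 : s.toList.take k = ['h','t','t','p']
      · have hk' : k = 4 := hlen _ e1
        subst hk'
        simp [e1, hset, PySem.Set.contains]
      · by_cases e2 : s.toList.take k = ['h','t','t','p','s']
        · have hk' : k = 5 := hlen _ e2
          subst hk'
          simp [e2, hset, PySem.Set.contains]
        · by_cases e3 : s.toList.take k = ['s','o','c','k','s','5','h']
          · have hk' : k = 7 := hlen _ e3
            subst hk'
            simp [e3, hset, PySem.Set.contains]
          · by_cases e4 : s.toList.take k = ['s','o','c','k','s','5']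
            · have hk' : k = 6 := hlen _ e4
              subst hk'
              simp [e4, hset, PySem.Set.contains]
            · simp [e1, e2, e3, e4, hset, PySem.Set.contains]
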